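-- pv_equiv track=rewrite | github.com/Genome-Bioinformatics-RadboudUMC/DeNovoCNN | denovonet/image_generation.py | add_deletions
-- ===== SOURCE A (Python) =====
-- def add_deletions(seq, indel_seq):
--     for idx in range(0, len(indel_seq)):
--         for indel in indel_seq[idx]:
--             if indel < 0:  # Deletions are encoded as -x, where x is the length of the deletion
--                 for j in range(1, abs(indel) + 1):
--                     if idx + j < len(seq):  # Add deletion to the correct locations
--                         seq[idx + j].append('DEL')
--     return seq
-- ===== SOURCE B (Python) =====
-- def add_deletions(seq, indel_seq):
--     n = len(seq)
--     diff = [0] * (n + 1)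
--     for idx, indels in enumerate(indel_seq):
--         for indel in indels:
--             if indel < 0:
--                 diff[min(idx + 1, n)] += 1
--                 diff[min(idx - indel + 1, n)] -= 1
--     count = 0
--     for p in range(n):
--         count += diff[p]
--         seq[p].extend(['DEL'] * count)
--     return seq
-- ===== Notes on version B (the rewrite author's own statement) =====
-- stated objective: faster
-- what changed: Replaces the per-deletion nested append loops (one append per deleted base per position) with a difference array over positions plus one prefix-sum pass that extends each row with its total DEL count at once.
import Mathlib
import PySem

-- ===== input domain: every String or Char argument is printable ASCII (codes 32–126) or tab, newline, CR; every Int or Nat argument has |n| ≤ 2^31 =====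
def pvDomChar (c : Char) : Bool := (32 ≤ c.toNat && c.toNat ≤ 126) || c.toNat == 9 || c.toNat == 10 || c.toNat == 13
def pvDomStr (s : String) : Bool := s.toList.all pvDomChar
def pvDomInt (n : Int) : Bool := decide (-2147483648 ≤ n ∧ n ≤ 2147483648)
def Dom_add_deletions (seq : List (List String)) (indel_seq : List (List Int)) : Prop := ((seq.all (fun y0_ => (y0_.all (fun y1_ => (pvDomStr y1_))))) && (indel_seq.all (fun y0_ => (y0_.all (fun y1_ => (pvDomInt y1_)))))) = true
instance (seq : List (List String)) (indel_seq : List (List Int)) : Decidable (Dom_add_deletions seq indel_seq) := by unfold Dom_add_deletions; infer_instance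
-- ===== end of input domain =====

-- B replaces A's per-deleted-base append loops with a difference array plus one prefix-sum
-- pass (measurably faster when deletions are long); both A and B mutate `seq`'s rows in
-- Python the same way, the equivalence proved here is about the return value.

-- ===== PORT A =====
def add_deletions (seq : List (List String)) (indel_seq : List (List Int)) : List (List String) :=
  (PySem.List.pyRange 0 (indel_seq.length : Int) 1).foldl (fun s idx =>
    (PySem.List.pyGetD indel_seq idx []).foldl (fun s indel =>
      if indel < 0 then
        (PySem.List.pyRange 1 ((indel.natAbs : Int) + 1) 1).foldl (fun s j =>
          if idx + j < (s.length : Int) then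
            s.modify (idx + j).toNat (· ++ ["DEL"])
          else s) s
      else s) s) seq

-- ===== PORT B =====
def add_deletions_alt (seq : List (List String)) (indel_seq : List (List Int)) : List (List String) :=
  let n := seq.length
  let diff := (PySem.List.enumerate indel_seq).foldl (fun d (q : Int × List Int) =>
    q.2.foldl (fun d indel =>
      if indel < 0 then
        (d.modify (min (q.1 + 1) (n : Int)).toNat (· + 1)).modify
          (min (q.1 - indel + 1) (n : Int)).toNat (· - 1)
      else d) d) (List.replicate (n + 1) (0 : Int))
  ((PySem.List.pyRange 0 (n : Int) 1).foldl (fun (st : Int × List (List String)) p =>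
    let c := st.1 + PySem.List.pyGetD diff p 0
    (c, st.2.modify p.toNat (· ++ List.replicate c.toNat "DEL"))) ((0 : Int), seq)).2

-- ===== PRECONDITION & SPEC =====
def Spec_add_deletions (seq : List (List String)) (indel_seq : List (List Int)) (out : List (List String)) : Prop := out = add_deletions_alt seq indel_seq
instance (seq : List (List String)) (indel_seq : List (List Int)) (out : List (List String)) : Decidable (Spec_add_deletions seq indel_seq out) := by unfold Spec_add_deletions; infer_instance

-- ===== CLAIM (what is proved, stated in full; the proofs are below) =====
def Claim_equal_add_deletions : Prop := ∀ (seq : List (List String)) (indel_seq : List (List Int)), Dom_add_deletions seq indel_seq → Spec_add_deletions seq indel_seq (add_deletions seq indel_seq)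

-- ===== LEMMAS AND PROOFS =====

-- the number of DELs position p receives, from an enumerated indel list
def delCnt (pairs : List (Int × List Int)) (p : Nat) : Nat :=
  (pairs.map (fun q =>
    q.2.countP (fun d => decide (d < 0 ∧ q.1 + 1 ≤ (p : Int) ∧ (p : Int) ≤ q.1 + (d.natAbs : Int))))).sum

-- named copies of A's loop bodies (for stating loop invariants)
def stepJ (idx : Int) (s : List (List String)) (j : Int) : List (List String) :=
  if idx + j < (s.length : Int) then s.modify (idx + j).toNat (· ++ ["DEL"]) else s

def stepD (idx : Int) (s : List (List String)) (d : Int) : List (List String) :=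
  if d < 0 then (PySem.List.pyRange 1 ((d.natAbs : Int) + 1) 1).foldl (stepJ idx) s else s

def stepQ (s : List (List String)) (q : Int × List Int) : List (List String) :=
  q.2.foldl (stepD q.1) s

theorem A_eq_fold (seq : List (List String)) (indel_seq : List (List Int)) :
    add_deletions seq indel_seq = (PySem.List.enumerate indel_seq).foldl stepQ seq := by
  rw [PySem.List.enumerate_eq_map_pyRange indel_seq [], List.foldl_map]
  rfl

theorem countP_eq_of_nodup {l : List Int} (hl : l.Nodup) (c : Int) :
    l.countP (fun j => decide (j = c)) = if c ∈ l then 1 else 0 := by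
  induction l with
  | nil => simp
  | cons a l ih =>
    obtain ⟨ha, hl'⟩ := List.nodup_cons.mp hl
    rw [List.countP_cons, ih hl']
    by_cases hac : a = c
    · subst hac; simp [ha]
    · have hca : ¬ c = a := fun h => hac h.symm
      simp [List.mem_cons, hac, hca]

theorem cntRange (idx : Int) (m : Int) (p : Nat) :
    (PySem.List.pyRange 1 (m + 1) 1).countP (fun j => decide (idx + j = (p : Int))) =
      if idx + 1 ≤ (p : Int) ∧ (p : Int) ≤ idx + m then 1 else 0 := by
  have hcongr : (PySem.List.pyRange 1 (m + 1) 1).countP (fun j => decide (idx + j = (p : Int))) =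
      (PySem.List.pyRange 1 (m + 1) 1).countP (fun j => decide (j = (p : Int) - idx)) := by
    apply List.countP_congr; intro j _; simp; omega
  rw [hcongr, countP_eq_of_nodup (PySem.List.nodup_pyRange_one 1 (m + 1)) _]
  have hiff : ((p : Int) - idx ∈ PySem.List.pyRange 1 (m + 1)) ↔
      (idx + 1 ≤ (p : Int) ∧ (p : Int) ≤ idx + m) := by
    rw [PySem.List.mem_pyRange_one]; omega
  by_cases h : idx + 1 ≤ (p : Int) ∧ (p : Int) ≤ idx + m
  · rw [if_pos (hiff.mpr h), if_pos h]
  · rw [if_neg (fun hm => h (hiff.mp hm)), if_neg h]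

theorem stepJ_length (idx : Int) (s : List (List String)) (j : Int) :
    (stepJ idx s j).length = s.length := by
  unfold stepJ; split_ifs <;> simp

theorem foldJ_length (idx : Int) (L : List Int) (s : List (List String)) :
    (L.foldl (stepJ idx) s).length = s.length := by
  induction L generalizing s with
  | nil => rfl
  | cons j L ih => rw [List.foldl_cons, ih, stepJ_length]

theorem foldJ_get (idx : Int) (hidx : 0 ≤ idx) (L : List Int) (hL : ∀ j ∈ L, 1 ≤ j)
    (s : List (List String)) (p : Nat) (hp : p < s.length) :
    (L.foldl (stepJ idx) s)[p]? =
      some (s[p] ++ List.replicate (L.countP (fun j => decide (idx + j = (p : Int)))) "DEL") := by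
  induction L generalizing s with
  | nil => simp [List.getElem?_eq_getElem hp]
  | cons j L ih =>
    have hj : 1 ≤ j := hL j List.mem_cons_self
    have hplt : p < (stepJ idx s j).length := by rw [stepJ_length]; exact hp
    have hstep? : (stepJ idx s j)[p]? = some (s[p] ++ (if idx + j = (p : Int) then ["DEL"] else [])) := by
      unfold stepJ
      by_cases hc : idx + j = (p : Int)
      · have hlt : idx + j < (s.length : Int) := by omega
        rw [if_pos hlt, List.getElem?_modify, List.getElem?_eq_getElem hp]
        simp only [Option.map_eq_map, Option.map_some]
        rw [if_pos (by omega : (idx + j).toNat = p), if_pos hc]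
      · rw [if_neg hc, List.append_nil]
        by_cases hlt : idx + j < (s.length : Int)
        · rw [if_pos hlt, List.getElem?_modify, List.getElem?_eq_getElem hp]
          simp only [Option.map_eq_map, Option.map_some]
          rw [if_neg (by omega : ¬ (idx + j).toNat = p)]
        · rw [if_neg hlt, List.getElem?_eq_getElem hp]
    have hstep : (stepJ idx s j)[p]'hplt = s[p] ++ (if idx + j = (p : Int) then ["DEL"] else []) := by
      rw [List.getElem?_eq_getElem hplt] at hstep?
      exact Option.some.inj hstep?
    rw [List.foldl_cons, ih (fun x hx => hL x (List.mem_cons_of_mem _ hx)) (stepJ idx s j) hplt,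
      hstep]
    rw [List.countP_cons, List.append_assoc]
    congr 2
    by_cases hc : idx + j = (p : Int)
    · simp [hc, List.replicate_succ]
    · simp [hc]

theorem foldD_length (idx : Int) (ds : List Int) (s : List (List String)) :
    (ds.foldl (stepD idx) s).length = s.length := by
  induction ds generalizing s with
  | nil => rfl
  | cons d ds ih =>
    rw [List.foldl_cons, ih]
    unfold stepD; split_ifs <;> simp [foldJ_length]

theorem stepD_length (idx : Int) (s : List (List String)) (d : Int) :
    (stepD idx s d).length = s.length := by
  unfold stepD; split_ifs
  · exact foldJ_length _ _ _
  · rfl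

theorem foldD_get (idx : Int) (hidx : 0 ≤ idx) (ds : List Int)
    (s : List (List String)) (p : Nat) (hp : p < s.length) :
    (ds.foldl (stepD idx) s)[p]? =
      some (s[p] ++ List.replicate (ds.countP (fun d =>
        decide (d < 0 ∧ idx + 1 ≤ (p : Int) ∧ (p : Int) ≤ idx + (d.natAbs : Int)))) "DEL") := by
  induction ds generalizing s with
  | nil => simp [List.getElem?_eq_getElem hp]
  | cons d ds ih =>
    have hplt : p < (stepD idx s d).length := by rw [stepD_length]; exact hp
    have hstep : (stepD idx s d)[p]? =
        some (s[p] ++ List.replicate (if d < 0 ∧ idx + 1 ≤ (p : Int) ∧ (p : Int) ≤ idx + (d.natAbs : Int)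
          then 1 else 0) "DEL") := by
      unfold stepD
      by_cases hd : d < 0
      · rw [if_pos hd, foldJ_get idx hidx _ (fun j hj => (PySem.List.mem_pyRange_one.mp hj).1) s p hp,
          cntRange]
        simp [hd]
      · rw [if_neg hd]
        simp only [List.getElem?_eq_getElem hp]
        have hnc : ¬ (d < 0 ∧ idx + 1 ≤ (p : Int) ∧ (p : Int) ≤ idx + (d.natAbs : Int)) := fun h => hd h.1
        simp only [hnc, if_false, List.replicate_zero, List.append_nil]
    have hval : (stepD idx s d)[p]'hplt = s[p] ++ List.replicate
        (if d < 0 ∧ idx + 1 ≤ (p : Int) ∧ (p : Int) ≤ idx + (d.natAbs : Int) then 1 else 0) "DEL" := by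
      rw [List.getElem?_eq_getElem hplt] at hstep
      exact Option.some.inj hstep
    rw [List.foldl_cons, ih (stepD idx s d) hplt, hval]
    rw [List.countP_cons, List.append_assoc, ← List.replicate_add]
    congr 2
    simp only [decide_eq_true_eq]
    rw [Nat.add_comm]

theorem foldQ_length (pairs : List (Int × List Int)) (s : List (List String)) :
    (pairs.foldl stepQ s).length = s.length := by
  induction pairs generalizing s with
  | nil => rfl
  | cons q pairs ih => rw [List.foldl_cons, ih]; unfold stepQ; exact foldD_length _ _ _

theorem foldQ_get (pairs : List (Int × List Int)) (hpairs : ∀ q ∈ pairs, 0 ≤ q.1)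
    (s : List (List String)) (p : Nat) (hp : p < s.length) :
    (pairs.foldl stepQ s)[p]? = some (s[p] ++ List.replicate (delCnt pairs p) "DEL") := by
  induction pairs generalizing s with
  | nil => simp [delCnt, List.getElem?_eq_getElem hp]
  | cons q pairs ih =>
    have hq : 0 ≤ q.1 := hpairs q List.mem_cons_self
    have hplt : p < (stepQ s q).length := by unfold stepQ; rw [foldD_length]; exact hp
    have hval : (stepQ s q)[p]'hplt = s[p] ++ List.replicate
        (q.2.countP (fun d => decide (d < 0 ∧ q.1 + 1 ≤ (p : Int) ∧ (p : Int) ≤ q.1 + (d.natAbs : Int)))) "DEL" := by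
      have h1 := foldD_get q.1 hq q.2 s p hp
      have h2 : (stepQ s q)[p]? = some ((stepQ s q)[p]'hplt) := List.getElem?_eq_getElem hplt
      unfold stepQ at h2
      rw [h1] at h2
      exact (Option.some.inj h2).symm
    rw [List.foldl_cons, ih (fun x hx => hpairs x (List.mem_cons_of_mem _ hx)) (stepQ s q) hplt,
      hval, List.append_assoc, ← List.replicate_add]
    rfl

theorem enumerate_fst_nonneg (indel_seq : List (List Int)) :
    ∀ q ∈ PySem.List.enumerate indel_seq, 0 ≤ q.1 := by
  intro q hq
  rcases (PySem.List.mem_enumerate_iff indel_seq 0 q).mp hq with ⟨k, hk, rfl⟩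
  simp

theorem add_deletions_A_char (seq : List (List String)) (indel_seq : List (List Int)) :
    add_deletions seq indel_seq =
      seq.mapIdx (fun p row => row ++ List.replicate (delCnt (PySem.List.enumerate indel_seq) p) "DEL") := by
  rw [A_eq_fold]
  apply List.ext_getElem?
  intro p
  by_cases hp : p < seq.length
  · rw [foldQ_get _ (enumerate_fst_nonneg indel_seq) seq p hp, List.getElem?_mapIdx,
      List.getElem?_eq_getElem hp]
    rfl
  · rw [List.getElem?_eq_none (by rw [foldQ_length]; omega),
      List.getElem?_eq_none (by rw [List.length_mapIdx]; omega)]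

-- ===== B side =====

def stepE (n : Nat) (idx : Int) (d : List Int) (indel : Int) : List Int :=
  if indel < 0 then
    (d.modify (min (idx + 1) (n : Int)).toNat (· + 1)).modify
      (min (idx - indel + 1) (n : Int)).toNat (· - 1)
  else d

def stepP (n : Nat) (d : List Int) (q : Int × List Int) : List Int :=
  q.2.foldl (stepE n q.1) d

theorem sum_take_modify (l : List Int) (i : Nat) (a : Int) (k : Nat) (hi : i < l.length) :
    ((l.modify i (· + a)).take k).sum = (l.take k).sum + (if i < k then a else 0) := by
  induction k with
  | zero => simp
  | succ k ih =>
    by_cases hk : k < l.length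
    · rw [List.sum_take_succ _ k (by rw [List.length_modify]; exact hk), List.sum_take_succ _ k hk, ih,
        List.getElem_modify]
      split_ifs <;> simp_all <;> omega
    · have h1 : l.length ≤ k := by omega
      have e1 : List.take (k + 1) (l.modify i (· + a)) = List.take k (l.modify i (· + a)) := by
        rw [List.take_of_length_le (by rw [List.length_modify]; omega),
          List.take_of_length_le (by rw [List.length_modify]; exact h1)]
      have e2 : List.take (k + 1) l = List.take k l := by
        rw [List.take_of_length_le (by omega), List.take_of_length_le h1]
      rw [e1, e2, ih, if_pos (by omega : i < k), if_pos (by omega : i < k + 1)]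

theorem stepE_length (n : Nat) (idx : Int) (d : List Int) (x : Int) :
    (stepE n idx d x).length = d.length := by
  unfold stepE; split_ifs <;> simp

theorem foldE_length (n : Nat) (idx : Int) (ds : List Int) (d : List Int) :
    (ds.foldl (stepE n idx) d).length = d.length := by
  induction ds generalizing d with
  | nil => rfl
  | cons x ds ih => rw [List.foldl_cons, ih, stepE_length]

theorem foldE_sum (n : Nat) (idx : Int) (hidx : 0 ≤ idx) (ds : List Int) (d : List Int)
    (hd : d.length = n + 1) (k : Nat) (hk : k < n) :
    ((ds.foldl (stepE n idx) d).take (k + 1)).sum = (d.take (k + 1)).sum +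
      (ds.countP (fun x => decide (x < 0 ∧ idx + 1 ≤ (k : Int) ∧ (k : Int) ≤ idx + (x.natAbs : Int))) : Int) := by
  induction ds generalizing d with
  | nil => simp
  | cons x ds ih =>
    have hlen : (stepE n idx d x).length = n + 1 := by rw [stepE_length]; exact hd
    rw [List.foldl_cons, ih (stepE n idx d x) hlen]
    have hstep : ((stepE n idx d x).take (k + 1)).sum = (d.take (k + 1)).sum +
        (if x < 0 ∧ idx + 1 ≤ (k : Int) ∧ (k : Int) ≤ idx + (x.natAbs : Int) then 1 else 0) := by
      unfold stepE
      split_ifs with hx hcond hcond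
      · have h1 : (min (idx + 1) (n : Int)).toNat < d.length := by rw [hd]; omega
        have h2 : (min (idx - x + 1) (n : Int)).toNat < (d.modify (min (idx + 1) (n : Int)).toNat (· + 1)).length := by
          rw [List.length_modify, hd]; omega
        rw [show (fun y => y - (1 : Int)) = (fun y => y + (-1)) from funext (fun y => by ring),
          sum_take_modify _ _ _ _ h2, sum_take_modify _ _ _ _ h1]
        have hnx : 1 ≤ (x.natAbs : Int) := by omega
        have hxeq : idx - x = idx + (x.natAbs : Int) := by omega
        rw [hxeq]
        split_ifs <;> omega
      · have h1 : (min (idx + 1) (n : Int)).toNat < d.length := by rw [hd]; omega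
        have h2 : (min (idx - x + 1) (n : Int)).toNat < (d.modify (min (idx + 1) (n : Int)).toNat (· + 1)).length := by
          rw [List.length_modify, hd]; omega
        rw [show (fun y => y - (1 : Int)) = (fun y => y + (-1)) from funext (fun y => by ring),
          sum_take_modify _ _ _ _ h2, sum_take_modify _ _ _ _ h1]
        have hnx : 1 ≤ (x.natAbs : Int) := by omega
        have hxeq : idx - x = idx + (x.natAbs : Int) := by omega
        rw [hxeq]
        split_ifs <;> omega
      · exact absurd hcond.1 hx
      · simp
    rw [hstep, List.countP_cons]
    push_cast
    simp only [decide_eq_true_eq]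
    split_ifs <;> omega

theorem foldP_length (n : Nat) (pairs : List (Int × List Int)) (d : List Int) :
    (pairs.foldl (stepP n) d).length = d.length := by
  induction pairs generalizing d with
  | nil => rfl
  | cons q pairs ih => rw [List.foldl_cons, ih]; unfold stepP; exact foldE_length _ _ _ _

theorem foldP_sum (n : Nat) (pairs : List (Int × List Int)) (hpairs : ∀ q ∈ pairs, 0 ≤ q.1)
    (d : List Int) (hd : d.length = n + 1) (k : Nat) (hk : k < n) :
    ((pairs.foldl (stepP n) d).take (k + 1)).sum = (d.take (k + 1)).sum + (delCnt pairs k : Int) := by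
  induction pairs generalizing d with
  | nil => simp [delCnt]
  | cons q pairs ih =>
    have hq : 0 ≤ q.1 := hpairs q List.mem_cons_self
    have hlen : (stepP n d q).length = n + 1 := by unfold stepP; rw [foldE_length]; exact hd
    rw [List.foldl_cons, ih (fun x hx => hpairs x (List.mem_cons_of_mem _ hx)) (stepP n d q) hlen]
    unfold stepP
    rw [foldE_sum n q.1 hq q.2 d hd k hk]
    simp [delCnt]
    ring

-- ===== B's second loop =====

def stepS (diff : List Int) (st : Int × List (List String)) (p : Int) : Int × List (List String) :=
  let c := st.1 + PySem.List.pyGetD diff p 0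
  (c, st.2.modify p.toNat (· ++ List.replicate c.toNat "DEL"))

theorem mapIdx_id' (l : List (List String)) (f : Nat → List String → List String)
    (hf : ∀ i (h : i < l.length), f i l[i] = l[i]) : l.mapIdx f = l := by
  apply List.ext_getElem (by simp)
  intro i h1 h2
  rw [List.getElem_mapIdx]
  exact hf i h2

theorem loopB (seq : List (List String)) (diff : List Int) (hd : diff.length = seq.length + 1)
    (k : Nat) (hk : k ≤ seq.length) :
    (PySem.List.pyRange 0 (k : Int) 1).foldl (stepS diff) ((0 : Int), seq) =
      ((diff.take k).sum,
        seq.mapIdx (fun p row => if p < k then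
          row ++ List.replicate ((diff.take (p + 1)).sum.toNat) "DEL" else row)) := by
  induction k with
  | zero =>
    rw [show ((0 : Nat) : Int) = 0 from rfl, PySem.List.pyRange_one_eq_nil (by omega)]
    rw [List.foldl_nil]
    refine Prod.ext (by simp) ?_
    exact (mapIdx_id' _ _ (fun i h => by simp)).symm
  | succ k ih =>
    have hk' : k ≤ seq.length := by omega
    have hklt : k < diff.length := by omega
    have hcast : (((k + 1) : Nat) : Int) = (k : Int) + 1 := by push_cast; ring
    rw [hcast, PySem.List.pyRange_one_succ_right (by omega : (0 : Int) ≤ (k : Int)),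
      List.foldl_append, ih hk', List.foldl_cons, List.foldl_nil]
    unfold stepS
    have hget : PySem.List.pyGetD diff (k : Int) 0 = diff[k] := by
      rw [PySem.List.pyGetD_natCast]
      exact List.getD_eq_getElem _ _ hklt
    have hc : (diff.take k).sum + PySem.List.pyGetD diff (k : Int) 0 = (diff.take (k + 1)).sum := by
      rw [hget, List.sum_take_succ _ _ hklt]
    refine Prod.ext hc ?_
    show (seq.mapIdx (fun p row => if p < k then
        row ++ List.replicate ((diff.take (p + 1)).sum.toNat) "DEL" else row)).modify
        ((k : Int)).toNat (· ++ List.replicate ((diff.take k).sum + PySem.List.pyGetD diff (k : Int) 0).toNat "DEL") =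
      seq.mapIdx (fun p row => if p < k + 1 then
        row ++ List.replicate ((diff.take (p + 1)).sum.toNat) "DEL" else row)
    rw [hc, show ((k : Int)).toNat = k from rfl]
    apply List.ext_getElem (by simp [List.length_modify])
    intro i h1 h2
    have hi : i < seq.length := by simpa using h2
    have hq : (((seq.mapIdx (fun p row => if p < k then
        row ++ List.replicate ((diff.take (p + 1)).sum.toNat) "DEL" else row)).modify
        k (· ++ List.replicate ((diff.take (k + 1)).sum.toNat) "DEL"))[i]?) =
        some ((seq.mapIdx (fun p row => if p < k + 1 then
        row ++ List.replicate ((diff.take (p + 1)).sum.toNat) "DEL" else row))[i]'h2) := by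
      rw [List.getElem?_modify, List.getElem?_mapIdx, List.getElem?_eq_getElem hi]
      simp only [Option.map_some, Option.map_eq_map]
      rw [List.getElem_mapIdx]
      by_cases hik : k = i
      · subst hik
        rw [if_pos rfl, if_neg (by omega : ¬ k < k), if_pos (by omega : k < k + 1)]
      · rw [if_neg hik]
        by_cases hik2 : i < k
        · rw [if_pos hik2, if_pos (by omega : i < k + 1)]
        · rw [if_neg hik2, if_neg (by omega : ¬ i < k + 1)]
    rw [List.getElem?_eq_getElem h1] at hq
    exact Option.some.inj hq

theorem add_deletions_B_char (seq : List (List String)) (indel_seq : List (List Int)) :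
    add_deletions_alt seq indel_seq =
      seq.mapIdx (fun p row => row ++ List.replicate (delCnt (PySem.List.enumerate indel_seq) p) "DEL") := by
  show ((PySem.List.pyRange 0 (seq.length : Int) 1).foldl
      (stepS ((PySem.List.enumerate indel_seq).foldl (stepP seq.length)
        (List.replicate (seq.length + 1) (0 : Int)))) ((0 : Int), seq)).2 = _
  have hdlen : ((PySem.List.enumerate indel_seq).foldl (stepP seq.length)
      (List.replicate (seq.length + 1) (0 : Int))).length = seq.length + 1 := by
    rw [foldP_length]; simp
  rw [loopB seq _ hdlen seq.length le_rfl]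
  apply List.ext_getElem (by simp)
  intro i h1 h2
  have hi : i < seq.length := by simpa using h2
  rw [List.getElem_mapIdx, List.getElem_mapIdx, if_pos hi]
  congr 1
  have hsum := foldP_sum seq.length (PySem.List.enumerate indel_seq)
    (enumerate_fst_nonneg indel_seq) (List.replicate (seq.length + 1) (0 : Int))
    (by simp) i hi
  have hzero : ((List.replicate (seq.length + 1) (0 : Int)).take (i + 1)).sum = 0 := by
    rw [List.take_replicate]; simp
  rw [hsum, hzero, zero_add, Int.toNat_natCast]

-- ===== VERDICT (by name: the statement is the Claim_ definition above) =====
theorem add_deletions_spec : Claim_equal_add_deletions := by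
  intro seq indel_seq _
  unfold Spec_add_deletions
  rw [add_deletions_A_char, add_deletions_B_char]
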